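-- pv_equiv track=rewrite | github.com/pizzama/framework | mod_team/battle/gapvpbattle.py | get_buff_record
-- ===== SOURCE A (Python) =====
-- def get_buff_record(battle_effect_list):
--     buff_record = {
--         "hp_buff": [0, 0, 0, 0],
--         "attack_buff": [0, 0, 0, 0],
--         "defense_buff": [0, 0, 0, 0],
--     }
--     for buff in battle_effect_list:
--         if buff[2] == 50:
--             if buff[3] == 1:
--                 buff_record["hp_buff"][0] += buff[4]
--             elif buff[3] == 2:
--                 buff_record["hp_buff"][1] += buff[4]
--             elif buff[3] == 3:
--                 buff_record["hp_buff"][2] += buff[4]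
--             elif buff[3] == 4:
--                 buff_record["hp_buff"][3] += buff[4]
--             elif buff[3] == 0:
--                 buff_record["hp_buff"][0] += buff[4]
--                 buff_record["hp_buff"][1] += buff[4]
--                 buff_record["hp_buff"][2] += buff[4]
--                 buff_record["hp_buff"][3] += buff[4]
--         elif buff[2] == 51:
--             if buff[3] == 1:
--                 buff_record["attack_buff"][0] += buff[4]
--             elif buff[3] == 2:
--                 buff_record["attack_buff"][1] += buff[4]
--             elif buff[3] == 3:
--                 buff_record["attack_buff"][2] += buff[4]
--             elif buff[3] == 4:
--                 buff_record["attack_buff"][3] += buff[4]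
--             elif buff[3] == 0:
--                 buff_record["attack_buff"][0] += buff[4]
--                 buff_record["attack_buff"][1] += buff[4]
--                 buff_record["attack_buff"][2] += buff[4]
--                 buff_record["attack_buff"][3] += buff[4]
--         elif buff[2] == 52:
--             if buff[3] == 1:
--                 buff_record["defense_buff"][0] += buff[4]
--             elif buff[3] == 2:
--                 buff_record["defense_buff"][1] += buff[4]
--             elif buff[3] == 3:
--                 buff_record["defense_buff"][2] += buff[4]
--             elif buff[3] == 4:
--                 buff_record["defense_buff"][3] += buff[4]
--             elif buff[3] == 0:
--                 buff_record["defense_buff"][0] += buff[4]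
--                 buff_record["defense_buff"][1] += buff[4]
--                 buff_record["defense_buff"][2] += buff[4]
--                 buff_record["defense_buff"][3] += buff[4]
--
--     return buff_record
-- ===== SOURCE B (Python) =====
-- def get_buff_record(battle_effect_list):
--     return {
--         name: [
--             sum(b[4] for b in battle_effect_list
--                 if b[2] == code and b[3] in (pos + 1, 0))
--             for pos in range(4)
--         ]
--         for code, name in ((50, "hp_buff"), (51, "attack_buff"), (52, "defense_buff"))
--     }
-- ===== Notes on version B (the rewrite author's own statement) =====
-- stated objective: idiomatic
-- what changed: Replaces the single mutating loop with a 15-branch if/elif cascade by a declarative dict/list comprehension that computes each of the 12 cells directly as a filtered sum over the list.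
import Mathlib
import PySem

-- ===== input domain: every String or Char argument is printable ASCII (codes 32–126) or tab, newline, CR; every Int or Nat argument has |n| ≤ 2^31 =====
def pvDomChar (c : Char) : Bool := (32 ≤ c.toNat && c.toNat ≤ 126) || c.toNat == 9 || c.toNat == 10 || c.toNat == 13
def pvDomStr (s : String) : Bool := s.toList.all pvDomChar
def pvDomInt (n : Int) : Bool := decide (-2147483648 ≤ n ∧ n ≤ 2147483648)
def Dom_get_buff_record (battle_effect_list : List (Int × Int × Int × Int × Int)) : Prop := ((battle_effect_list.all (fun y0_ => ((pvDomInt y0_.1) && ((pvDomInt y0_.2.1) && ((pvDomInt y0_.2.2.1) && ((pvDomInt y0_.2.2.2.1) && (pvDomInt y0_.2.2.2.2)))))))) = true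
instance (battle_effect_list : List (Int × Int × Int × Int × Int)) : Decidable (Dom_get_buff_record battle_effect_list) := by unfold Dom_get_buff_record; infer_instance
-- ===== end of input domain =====

-- B replaces A's single mutating loop with a 15-branch if/elif cascade by a comprehension
-- computing each of the 12 cells as a filtered sum; objective: more idiomatic, same cost.

-- ===== PORT A =====
-- lst[i] += v on a literal in-range index
def pvAddAt (l : List Int) (i : Nat) (v : Int) : List Int := l.set i (l.getD i 0 + v)

-- the body of A's for-loop, state = (hp_buff, attack_buff, defense_buff)
def pvStepA (s : List Int × List Int × List Int) (b : Int × Int × Int × Int × Int) :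
    List Int × List Int × List Int :=
  let (h, a, d) := s
  let v := b.2.2.2.2
  if b.2.2.1 = 50 then
    if b.2.2.2.1 = 1 then (pvAddAt h 0 v, a, d)
    else if b.2.2.2.1 = 2 then (pvAddAt h 1 v, a, d)
    else if b.2.2.2.1 = 3 then (pvAddAt h 2 v, a, d)
    else if b.2.2.2.1 = 4 then (pvAddAt h 3 v, a, d)
    else if b.2.2.2.1 = 0 then (pvAddAt (pvAddAt (pvAddAt (pvAddAt h 0 v) 1 v) 2 v) 3 v, a, d)
    else (h, a, d)
  else if b.2.2.1 = 51 then
    if b.2.2.2.1 = 1 then (h, pvAddAt a 0 v, d)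
    else if b.2.2.2.1 = 2 then (h, pvAddAt a 1 v, d)
    else if b.2.2.2.1 = 3 then (h, pvAddAt a 2 v, d)
    else if b.2.2.2.1 = 4 then (h, pvAddAt a 3 v, d)
    else if b.2.2.2.1 = 0 then (h, pvAddAt (pvAddAt (pvAddAt (pvAddAt a 0 v) 1 v) 2 v) 3 v, d)
    else (h, a, d)
  else if b.2.2.1 = 52 then
    if b.2.2.2.1 = 1 then (h, a, pvAddAt d 0 v)
    else if b.2.2.2.1 = 2 then (h, a, pvAddAt d 1 v)
    else if b.2.2.2.1 = 3 then (h, a, pvAddAt d 2 v)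
    else if b.2.2.2.1 = 4 then (h, a, pvAddAt d 3 v)
    else if b.2.2.2.1 = 0 then (h, a, pvAddAt (pvAddAt (pvAddAt (pvAddAt d 0 v) 1 v) 2 v) 3 v)
    else (h, a, d)
  else (h, a, d)

def get_buff_record (battle_effect_list : List (Int × Int × Int × Int × Int)) : List (String × List Int) :=
  let fin := battle_effect_list.foldl pvStepA ([0, 0, 0, 0], [0, 0, 0, 0], [0, 0, 0, 0])
  [("hp_buff", fin.1), ("attack_buff", fin.2.1), ("defense_buff", fin.2.2)]

-- ===== PORT B =====
-- sum(b[4] for b in xs if b[2] == code and b[3] in (pos+1, 0))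
def pvBSum (xs : List (Int × Int × Int × Int × Int)) (code : Int) (pos : Int) : Int :=
  ((xs.filter (fun b => b.2.2.1 == code && (b.2.2.2.1 == pos + 1 || b.2.2.2.1 == 0))).map
    (fun b => b.2.2.2.2)).sum

def get_buff_record_alt (battle_effect_list : List (Int × Int × Int × Int × Int)) : List (String × List Int) :=
  [(50, "hp_buff"), (51, "attack_buff"), (52, "defense_buff")].map
    (fun cn => (cn.2, (List.range 4).map (fun pos => pvBSum battle_effect_list cn.1 (pos : Int))))

-- ===== PRECONDITION & SPEC =====
def Spec_get_buff_record (battle_effect_list : List (Int × Int × Int × Int × Int)) (out : List (String × List Int)) : Prop := out = get_buff_record_alt battle_effect_list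
instance (battle_effect_list : List (Int × Int × Int × Int × Int)) (out : List (String × List Int)) : Decidable (Spec_get_buff_record battle_effect_list out) := by unfold Spec_get_buff_record; infer_instance

-- ===== CLAIM (what is proved, stated in full; the proofs are below) =====
def Claim_equal_get_buff_record : Prop := ∀ (battle_effect_list : List (Int × Int × Int × Int × Int)), Dom_get_buff_record battle_effect_list → Spec_get_buff_record battle_effect_list (get_buff_record battle_effect_list)

-- ===== LEMMAS AND PROOFS =====
theorem pvBSum_cons (x : Int × Int × Int × Int × Int) (xs : List (Int × Int × Int × Int × Int))
    (c p : Int) :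
    pvBSum (x :: xs) c p =
      (if x.2.2.1 = c ∧ (x.2.2.2.1 = p + 1 ∨ x.2.2.2.1 = 0) then x.2.2.2.2 else 0) +
        pvBSum xs c p := by
  simp only [pvBSum, List.filter_cons]
  split_ifs with h₁ h₂ h₂ <;> simp_all

theorem pvLoop_eq (xs : List (Int × Int × Int × Int × Int))
    (h0 h1 h2 h3 a0 a1 a2 a3 d0 d1 d2 d3 : Int) :
    xs.foldl pvStepA ([h0, h1, h2, h3], [a0, a1, a2, a3], [d0, d1, d2, d3]) =
      ([h0 + pvBSum xs 50 0, h1 + pvBSum xs 50 1, h2 + pvBSum xs 50 2, h3 + pvBSum xs 50 3],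
       [a0 + pvBSum xs 51 0, a1 + pvBSum xs 51 1, a2 + pvBSum xs 51 2, a3 + pvBSum xs 51 3],
       [d0 + pvBSum xs 52 0, d1 + pvBSum xs 52 1, d2 + pvBSum xs 52 2, d3 + pvBSum xs 52 3]) := by
  induction xs generalizing h0 h1 h2 h3 a0 a1 a2 a3 d0 d1 d2 d3 with
  | nil => simp [pvBSum]
  | cons x xs ih =>
    obtain ⟨p1, p2, c, pos, v⟩ := x
    simp only [List.foldl_cons, pvStepA, pvAddAt]
    split_ifs <;> simp_all [pvBSum_cons, List.set, List.getD, add_assoc]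

-- ===== VERDICT (by name: the statement is the Claim_ definition above) =====
theorem get_buff_record_spec : Claim_equal_get_buff_record := by
  intro xs _
  unfold Spec_get_buff_record get_buff_record get_buff_record_alt
  simp [pvLoop_eq, List.range_succ]
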